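-- pv_equiv track=rewrite | github.com/trantuyen1991/ETL_EMS_REPORT | src/services/utility_service.py | _score_sensor_flags
-- ===== SOURCE A (Python) =====
-- def _score_sensor_flags(flags: list[dict[str, str]]) -> int:
--     """Return sortable anomaly score from ordered flags."""
--     score = 0
--     for flag in flags:
--         if flag.get("severity") == "critical":
--             score += 100
--         else:
--             score += 25
--     return score
-- ===== SOURCE B (Python) =====
-- def _score_sensor_flags(flags: list[dict[str, str]]) -> int:
--     """Return sortable anomaly score from ordered flags."""
--     counts = {}
--     for flag in flags:
--         sev = flag.get("severity")
--         counts[sev] = counts.get(sev, 0) + 1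
--     return sum((100 if sev == "critical" else 25) * n for sev, n in counts.items())
-- ===== Notes on version B (the rewrite author's own statement) =====
-- stated objective: alternative
-- what changed: B first builds a severity-frequency histogram (dict severity -> count) in one grouping pass and then computes the weighted sum over the distinct severities, instead of A's per-flag add-25-or-100 accumulator.
import Mathlib
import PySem

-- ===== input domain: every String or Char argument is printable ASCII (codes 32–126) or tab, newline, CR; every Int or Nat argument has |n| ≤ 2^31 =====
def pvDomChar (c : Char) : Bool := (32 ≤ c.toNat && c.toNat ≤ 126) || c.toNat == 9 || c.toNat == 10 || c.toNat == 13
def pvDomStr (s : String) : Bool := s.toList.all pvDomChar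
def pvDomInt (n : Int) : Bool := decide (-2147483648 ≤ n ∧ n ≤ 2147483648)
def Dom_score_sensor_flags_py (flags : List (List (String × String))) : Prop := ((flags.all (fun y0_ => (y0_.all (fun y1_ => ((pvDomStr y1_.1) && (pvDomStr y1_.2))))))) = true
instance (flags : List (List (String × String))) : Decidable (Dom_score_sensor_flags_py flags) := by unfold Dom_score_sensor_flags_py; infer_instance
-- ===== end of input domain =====

-- B builds a severity→count histogram first and then takes the weighted sum over the
-- distinct severities, instead of A's per-flag add-25-or-100 accumulator (objective:
-- alternative; same O(n) cost).

-- ===== PORT A =====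
def score_sensor_flags_py (flags : List (List (String × String))) : Int :=
  flags.foldl (fun score flag =>
    if (PySem.Dict.ofList flag).get? "severity" == some "critical" then score + 100
    else score + 25) 0

-- ===== PORT B =====
def score_sensor_flags_py_alt (flags : List (List (String × String))) : Int :=
  let counts : PySem.Dict (Option String) Int :=
    flags.foldl (fun d flag =>
      let sev := (PySem.Dict.ofList flag).get? "severity"
      d.insert sev (d.getD sev 0 + 1)) PySem.Dict.empty
  (counts.items.map (fun p =>
    (if p.1 == some "critical" then (100 : Int) else 25) * p.2)).sum

-- ===== PRECONDITION & SPEC =====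
def Spec_score_sensor_flags_py (flags : List (List (String × String))) (out : Int) : Prop := out = score_sensor_flags_py_alt flags
instance (flags : List (List (String × String))) (out : Int) : Decidable (Spec_score_sensor_flags_py flags out) := by unfold Spec_score_sensor_flags_py; infer_instance

-- ===== CLAIM (what is proved, stated in full; the proofs are below) =====
def Claim_equal_score_sensor_flags_py : Prop := ∀ (flags : List (List (String × String))), Dom_score_sensor_flags_py flags → Spec_score_sensor_flags_py flags (score_sensor_flags_py flags)

-- ===== LEMMAS AND PROOFS =====

-- the severity looked up by both programs
def pvSev (flag : List (String × String)) : Option String :=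
  (PySem.Dict.ofList flag).get? "severity"

-- the per-severity weight both programs use
def pvWeight (k : Option String) : Int := if k == some "critical" then 100 else 25

-- A's fold is the plain sum of weights
lemma score_foldl (flags : List (List (String × String))) (s : Int) :
    flags.foldl (fun score flag =>
      if (PySem.Dict.ofList flag).get? "severity" == some "critical" then score + 100
      else score + 25) s
    = s + ((flags.map (fun f => pvWeight (pvSev f))).sum) := by
  induction flags generalizing s with
  | nil => simp
  | cons f rest ih =>
    rw [List.foldl_cons]
    by_cases h : ((PySem.Dict.ofList f).get? "severity" == some "critical") = true
    · have h' : (PySem.Dict.ofList f).get? "severity" = some "critical" := by simpa using h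
      rw [if_pos h, ih]
      simp [pvWeight, pvSev, h']; ring
    · have h' : ¬ (PySem.Dict.ofList f).get? "severity" = some "critical" := by simpa using h
      rw [if_neg h, ih]
      simp [pvWeight, pvSev, h']; ring

-- the two BEq instances on Option String count identically
lemma count_beq (k : Option String) (xs : List (Option String)) :
    @List.count _ Option.instBEq k xs = @List.count _ instBEqOfDecidableEq k xs := by
  induction xs with
  | nil => rfl
  | cons x t ih => simp [List.count_cons, ih]

-- a weighted sum over the distinct values with multiplicities is the plain sum of weights
lemma wsum_dedup (w : Option String → Int) (xs : List (Option String)) :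
    ((PySem.List.dedup xs).map (fun k => w k * (xs.count k : Int))).sum
      = (xs.map w).sum := by
  have hfin : (PySem.List.dedup xs).toFinset = xs.toFinset := by
    apply Finset.ext; intro a
    simp [List.mem_toFinset]
  calc ((PySem.List.dedup xs).map (fun k => w k * (xs.count k : Int))).sum
      = ((PySem.List.dedup xs).toFinset.sum (fun k => w k * (xs.count k : Int))) :=
        (List.sum_toFinset _ (PySem.List.nodup_dedup xs)).symm
    _ = (xs.toFinset.sum (fun k => w k * (xs.count k : Int))) := by rw [hfin]
    _ = (xs.toFinset.sum (fun k => @List.count _ instBEqOfDecidableEq k xs • w k)) := by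
        apply Finset.sum_congr rfl; intro k _
        rw [← count_beq, nsmul_eq_mul, mul_comm]
    _ = (xs.map w).sum := (Finset.sum_list_map_count xs w).symm

-- ===== VERDICT (by name: the statement is the Claim_ definition above) =====
theorem score_sensor_flags_py_spec : Claim_equal_score_sensor_flags_py := by
  intro flags _
  unfold Spec_score_sensor_flags_py score_sensor_flags_py score_sensor_flags_py_alt
  rw [score_foldl]
  have hcounter :
      flags.foldl (fun d flag =>
        let sev := (PySem.Dict.ofList flag).get? "severity"
        d.insert sev (d.getD sev 0 + 1)) PySem.Dict.empty
      = PySem.Dict.counter (flags.map pvSev) := by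
    show flags.foldl (fun d flag => d.insert (pvSev flag) (d.getD (pvSev flag) 0 + 1))
        PySem.Dict.empty = PySem.Dict.counter (flags.map pvSev)
    rw [← PySem.Dict.foldl_insert_getD_add_one_eq_counter, List.foldl_map]
  simp only [hcounter, PySem.Dict.items_counter, ← PySem.List.dedup_eq_ofList,
    List.map_map]
  rw [show ((fun p : Option String × Int =>
        (if p.1 == some "critical" then (100 : Int) else 25) * p.2) ∘
        (fun k => (k, ((flags.map pvSev).count k : Int))))
      = fun k => pvWeight k * (((flags.map pvSev).count k : Int)) from rfl]
  rw [wsum_dedup pvWeight (flags.map pvSev), List.map_map]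
  simp only [Function.comp_def]
  omega
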